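-- pv_equiv track=rewrite | github.com/swagata-datta/advent-of-code-2021 | day-8.py | part_1
-- ===== SOURCE A (Python) =====
-- def part_1(inp):
--     """takes in list of string after | and returns the result"""
--     inp = [i.split() for i in inp]
--     inp_ = []
--     for i in inp:
--         inp_ += i
--     inp_ = [len(i) for i in inp_]
--     score = sum([1 for i in inp_ if (i == 2) or (i == 3) or (i == 4) or (i == 7)])
--     return score
-- ===== SOURCE B (Python) =====
-- def part_1(inp):
--     """takes in list of string after | and returns the result"""
--     score = 0
--     for line in inp:
--         run = 0
--         for ch in line:
--             if ch.isspace():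
--                 if run in (2, 3, 4, 7):
--                     score += 1
--                 run = 0
--             else:
--                 run += 1
--         if run in (2, 3, 4, 7):
--             score += 1
--     return score
-- ===== Notes on version B (the rewrite author's own statement) =====
-- stated objective: alternative
-- what changed: B is a character-level state machine: it scans each line once, tracking the length of the current non-whitespace run and bumping the score when a run of length 2/3/4/7 ends, never building the word lists, length list or filtered list that A constructs.
import Mathlib
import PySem

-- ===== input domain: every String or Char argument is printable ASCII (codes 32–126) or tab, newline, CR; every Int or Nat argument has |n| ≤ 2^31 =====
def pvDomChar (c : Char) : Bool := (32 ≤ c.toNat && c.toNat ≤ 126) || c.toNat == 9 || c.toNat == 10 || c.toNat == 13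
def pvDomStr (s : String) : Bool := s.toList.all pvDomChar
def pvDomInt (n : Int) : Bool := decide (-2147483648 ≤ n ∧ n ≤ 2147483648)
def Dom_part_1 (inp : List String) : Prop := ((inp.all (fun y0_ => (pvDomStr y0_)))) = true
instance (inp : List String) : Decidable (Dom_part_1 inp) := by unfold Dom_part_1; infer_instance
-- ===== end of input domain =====

-- B replaces A's split/flatten/map/filter pipeline by a single character-level scan per
-- line (a state machine tracking the current non-whitespace run length); alternative, same cost.

-- ===== PORT A =====
def part_1 (inp : List String) : Int :=
  let inp1 := inp.map (fun i => PySem.Str.split₀ i)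
  let inpU := inp1.foldl (fun acc i => acc ++ i) []
  let lens := inpU.map (fun i => (PySem.Str.len i : Int))
  let score := ((lens.filter (fun i => i == 2 || i == 3 || i == 4 || i == 7)).map
    (fun _ => (1 : Int))).sum
  score

-- ===== PORT B =====
-- `run in (2, 3, 4, 7)`
def pvGood (n : Nat) : Bool := n == 2 || n == 3 || n == 4 || n == 7

def part_1_alt (inp : List String) : Int :=
  inp.foldl (fun score line =>
    let st := line.toList.foldl
      (fun (p : Int × Nat) c =>
        if PySem.Chars.isspace c then
          ((if pvGood p.2 then p.1 + 1 else p.1), 0)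
        else (p.1, p.2 + 1))
      (score, 0)
    if pvGood st.2 then st.1 + 1 else st.1) 0

-- ===== PRECONDITION & SPEC =====
def Spec_part_1 (inp : List String) (out : Int) : Prop := out = part_1_alt inp
instance (inp : List String) (out : Int) : Decidable (Spec_part_1 inp out) := by unfold Spec_part_1; infer_instance

-- ===== CLAIM (what is proved, stated in full; the proofs are below) =====
def Claim_equal_part_1 : Prop := ∀ (inp : List String), Dom_part_1 inp → Spec_part_1 inp (part_1 inp)

-- ===== LEMMAS AND PROOFS =====

-- number of words of 'good' length in a list of words
def pvG (ws : List (List Char)) : Int := ((ws.filter (fun w => pvGood w.length)).length : Int)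

theorem pvG_append (a b : List (List Char)) : pvG (a ++ b) = pvG a + pvG b := by
  simp [pvG, List.filter_append]

-- the accumulator of split₀.go factors out
theorem pv_go_acc (cs : List Char) (cur : List Char) (acc : List (List Char)) :
    PySem.Chars.split₀.go cs cur acc = acc.reverse ++ PySem.Chars.split₀.go cs cur [] := by
  induction cs generalizing cur acc with
  | nil =>
    simp only [PySem.Chars.split₀.go]
    by_cases h : cur.isEmpty <;> simp [h]
  | cons c rest ih =>
    simp only [PySem.Chars.split₀.go]
    by_cases hs : PySem.Chars.isspace c
    · simp only [hs, if_true]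
      by_cases h : cur.isEmpty
      · simp only [h, if_true]
        exact ih [] acc
      · simp only [h, Bool.false_eq_true, if_false]
        rw [ih [] (cur.reverse :: acc), ih [] [cur.reverse]]
        simp
    · simp only [hs, ite_false, Bool.false_eq_true]
      exact ih _ _

-- the state machine over the rest of a line counts the good words split₀.go would produce
theorem pv_machine (cs : List Char) (cur : List Char) (score : Int) :
    (let st := cs.foldl
       (fun (p : Int × Nat) c =>
         if PySem.Chars.isspace c then
           ((if pvGood p.2 then p.1 + 1 else p.1), 0)
         else (p.1, p.2 + 1))
       (score, cur.length)
     if pvGood st.2 then st.1 + 1 else st.1)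
    = score + pvG (PySem.Chars.split₀.go cs cur []) := by
  induction cs generalizing cur score with
  | nil =>
    simp only [List.foldl_nil, PySem.Chars.split₀.go]
    by_cases h : cur.isEmpty
    · have : cur = [] := List.isEmpty_iff.mp h
      subst this
      simp [pvG, pvGood]
    · have hne : cur ≠ [] := fun hh => h (by simp [hh])
      simp only [h, ite_false, Bool.false_eq_true]
      by_cases hg : pvGood cur.length <;> simp [pvG, hg]
  | cons c rest ih =>
    simp only [List.foldl_cons, PySem.Chars.split₀.go]
    by_cases hs : PySem.Chars.isspace c
    · simp only [hs, ite_true, if_true]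
      by_cases h : cur.isEmpty
      · have : cur = [] := List.isEmpty_iff.mp h
        subst this
        have := ih [] (score := score)
        simp only [List.length_nil] at this ⊢
        simp only [pvGood] at *
        simpa using this
      · have hg := ih [] (score := if pvGood cur.length then score + 1 else score)
        simp only [List.length_nil] at hg
        simp only [h, Bool.false_eq_true, if_false]
        rw [hg, pv_go_acc rest [] [cur.reverse], pvG_append]
        by_cases hgg : pvGood cur.length <;> simp [pvG, hgg] <;> ring
    · simp only [hs, ite_false, Bool.false_eq_true, if_false]
      have := ih (c :: cur) score
      simpa using this

-- the machine on one full line from run = 0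
theorem pv_line (score : Int) (line : String) :
    (let st := line.toList.foldl
       (fun (p : Int × Nat) c =>
         if PySem.Chars.isspace c then
           ((if pvGood p.2 then p.1 + 1 else p.1), 0)
         else (p.1, p.2 + 1))
       (score, 0)
     if pvGood st.2 then st.1 + 1 else st.1)
    = score + pvG (PySem.Chars.split₀ line.toList) := by
  have := pv_machine line.toList [] score
  simpa [PySem.Chars.split₀] using this

-- B equals the good-word count of the flattened word list
theorem pv_alt_eq (inp : List String) (score : Int) :
    inp.foldl (fun score line =>
      let st := line.toList.foldl
        (fun (p : Int × Nat) c =>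
          if PySem.Chars.isspace c then
            ((if pvGood p.2 then p.1 + 1 else p.1), 0)
          else (p.1, p.2 + 1))
        (score, 0)
      if pvGood st.2 then st.1 + 1 else st.1) score
    = score + pvG (inp.flatMap (fun s => PySem.Chars.split₀ s.toList)) := by
  induction inp generalizing score with
  | nil => simp [pvG]
  | cons a t ih =>
    rw [List.foldl_cons, List.flatMap_cons, pvG_append, pv_line, ih]
    ring

-- summing 1 over a list is its length
theorem pv_sum_ones (l : List Int) : (l.map (fun _ => (1 : Int))).sum = (l.length : Int) := by
  induction l with
  | nil => simp
  | cons a t ih => simp [ih]; ring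

-- the Int-cast length test is pvGood
theorem pv_good_cast (n : Nat) :
    (((n : Int) == 2 || (n : Int) == 3 || (n : Int) == 4 || (n : Int) == 7)) = pvGood n := by
  apply Bool.eq_iff_iff.mpr
  simp only [pvGood, Bool.or_eq_true, beq_iff_eq]
  omega

-- counting good words through the String wrapper
theorem pv_line_count (ws : List (List Char)) :
    ((ws.map String.ofList).filter
      (fun x : String => ((x.toList.length : Int) == 2 || (x.toList.length : Int) == 3 ||
        (x.toList.length : Int) == 4 || (x.toList.length : Int) == 7))).length
    = (ws.filter (fun w => pvGood w.length)).length := by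
  rw [List.filter_map, List.length_map]
  congr 1
  apply List.filter_congr
  intro w _
  simp [Function.comp, pv_good_cast]

-- A equals the good-word count of the flattened word list
theorem pv_A_eq (inp : List String) :
    part_1 inp = pvG (inp.flatMap (fun s => PySem.Chars.split₀ s.toList)) := by
  unfold part_1
  simp only []
  rw [PySem.List.foldl_append_eq_flatMap, List.nil_append, List.filter_map, pv_sum_ones,
    List.length_map]
  simp only [PySem.Str.split₀, PySem.Str.len]
  rw [List.flatMap_map]
  simp only [Function.comp_def]
  rw [show (List.flatMap (fun i => List.map String.ofList (PySem.Chars.split₀ i.toList)) inp)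
        = (inp.flatMap (fun s => PySem.Chars.split₀ s.toList)).map String.ofList from
      List.map_flatMap.symm]
  rw [pv_line_count]
  rfl

-- ===== VERDICT (by name: the statement is the Claim_ definition above) =====
theorem part_1_spec : Claim_equal_part_1 := by
  intro inp _
  unfold Spec_part_1 part_1_alt
  simp only []
  rw [pv_alt_eq, zero_add, pv_A_eq]
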